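-- pv_equiv track=rewrite | github.com/masahiro-999/atcoder-workspace | abc343/F/main.py | f
-- ===== SOURCE A (Python) =====
-- from collections import Counter, defaultdict, deque
--
-- def f(a,b):
--     cnt = Counter()
--     for x in [a,b]:
--         cnt[x[0]] += x[1]
--         cnt[x[2]] += x[3]
--
--     k_list = sorted(cnt.keys(), reverse=True)
--     if len(k_list)== 0:
--         return ((0,0,0,0))
--     if len(k_list)== 1:
--         return (k_list[0], cnt[k_list[0]], 0,0)
--     return (k_list[0], cnt[k_list[0]], k_list[1], cnt[k_list[1]])
-- ===== SOURCE B (Python) =====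
-- def f(a, b):
--     # Sort-based aggregation instead of hashing: sort the four (key, value)
--     # pairs by key descending, then coalesce adjacent runs of equal keys into
--     # (key, run-sum) groups; the first two groups (zero-padded) are the answer.
--     pairs = sorted([(a[0], a[1]), (a[2], a[3]), (b[0], b[1]), (b[2], b[3])],
--                    key=lambda p: p[0], reverse=True)
--
--     def merge(ps):
--         if len(ps) <= 1:
--             return ps
--         (k1, v1), (k2, v2) = ps[0], ps[1]
--         if k1 == k2:
--             return merge([(k1, v1 + v2)] + ps[2:])
--         return [ps[0]] + merge(ps[1:])
--
--     m = merge(pairs) + [(0, 0), (0, 0)]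
--     return (m[0][0], m[0][1], m[1][0], m[1][1])
-- ===== Notes on version B (the rewrite author's own statement) =====
-- stated objective: alternative
-- what changed: B replaces A's hash aggregation (Counter built by key lookups, then a descending sort of the distinct keys) by sort-based aggregation: it sorts the four (key,value) pairs descending by key and coalesces adjacent equal-key runs in one recursive merge pass, then reads the first two groups with zero padding.
import Mathlib
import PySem

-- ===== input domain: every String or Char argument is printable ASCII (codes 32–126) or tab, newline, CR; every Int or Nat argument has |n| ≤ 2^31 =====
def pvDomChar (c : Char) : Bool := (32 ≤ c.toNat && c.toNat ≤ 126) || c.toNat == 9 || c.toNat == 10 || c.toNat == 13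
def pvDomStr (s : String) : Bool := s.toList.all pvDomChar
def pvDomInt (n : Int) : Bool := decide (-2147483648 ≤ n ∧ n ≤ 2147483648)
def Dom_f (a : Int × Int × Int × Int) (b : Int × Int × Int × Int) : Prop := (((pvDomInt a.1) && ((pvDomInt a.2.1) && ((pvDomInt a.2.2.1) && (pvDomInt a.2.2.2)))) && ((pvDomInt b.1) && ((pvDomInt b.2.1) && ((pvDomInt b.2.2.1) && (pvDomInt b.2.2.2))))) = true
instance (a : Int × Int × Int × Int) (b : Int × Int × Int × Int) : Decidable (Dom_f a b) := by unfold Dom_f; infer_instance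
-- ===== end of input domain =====

-- B aggregates by sorting the four (key,value) pairs descending and coalescing adjacent
-- equal-key runs in one merge pass, instead of A's Counter dict followed by a key sort.

-- ===== PORT A =====
-- Counter update loop: for x in [a,b]: cnt[x[0]] += x[1]; cnt[x[2]] += x[3]
def f (a : Int × Int × Int × Int) (b : Int × Int × Int × Int) : Int × Int × Int × Int :=
  let cnt := [a, b].foldl (fun d x =>
      let d := PySem.Dict.insert d x.1 (PySem.Dict.getD d x.1 0 + x.2.1)
      PySem.Dict.insert d x.2.2.1 (PySem.Dict.getD d x.2.2.1 0 + x.2.2.2)) PySem.Dict.empty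
  let kList := PySem.List.sorted cnt.keys (fun k => k) true
  match kList with
  | [] => (0, 0, 0, 0)
  | [k0] => (k0, cnt.getD k0 0, 0, 0)
  | k0 :: k1 :: _ => (k0, cnt.getD k0 0, k1, cnt.getD k1 0)

-- ===== PORT B =====
-- the recursive merge(ps) helper of Source B: coalesce adjacent equal keys
def mergeRuns : List (Int × Int) → List (Int × Int)
  | [] => []
  | [p] => [p]
  | p :: q :: t =>
    if p.1 == q.1 then mergeRuns ((p.1, p.2 + q.2) :: t)
    else p :: mergeRuns (q :: t)
termination_by l => l.length

def f_alt (a : Int × Int × Int × Int) (b : Int × Int × Int × Int) : Int × Int × Int × Int :=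
  let pairs : List (Int × Int) :=
    [(a.1, a.2.1), (a.2.2.1, a.2.2.2), (b.1, b.2.1), (b.2.2.1, b.2.2.2)]
  let m := mergeRuns (PySem.List.sorted pairs (fun p => p.1) true) ++ [(0, 0), (0, 0)]
  let g0 := PySem.List.pyGetD m 0 ((0 : Int), (0 : Int))
  let g1 := PySem.List.pyGetD m 1 ((0 : Int), (0 : Int))
  (g0.1, g0.2, g1.1, g1.2)

-- ===== PRECONDITION & SPEC =====
def Spec_f (a : Int × Int × Int × Int) (b : Int × Int × Int × Int) (out : Int × Int × Int × Int) : Prop := out = f_alt a b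
instance (a : Int × Int × Int × Int) (b : Int × Int × Int × Int) (out : Int × Int × Int × Int) : Decidable (Spec_f a b out) := by unfold Spec_f; infer_instance

-- ===== CLAIM (what is proved, stated in full; the proofs are below) =====
def Claim_equal_f : Prop := ∀ (a : Int × Int × Int × Int) (b : Int × Int × Int × Int), Dom_f a b → Spec_f a b (f a b)

-- ===== LEMMAS AND PROOFS =====

-- total value recorded under key k in a pair list
def sumFor (L : List (Int × Int)) (k : Int) : Int :=
  ((L.filter (fun p => p.1 == k)).map (·.2)).sum

-- The counter loop's lookup is the sum of the values recorded under that key.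
theorem getD_foldl_insert_add (l : List (Int × Int)) (d : PySem.Dict Int Int) (k : Int) :
    (l.foldl (fun d p => PySem.Dict.insert d p.1 (PySem.Dict.getD d p.1 0 + p.2)) d).getD k 0
      = d.getD k 0 + sumFor l k := by
  induction l generalizing d with
  | nil => simp [sumFor]
  | cons p t ih =>
    rw [List.foldl_cons, ih, PySem.Dict.getD_insert]
    by_cases h : p.1 = k
    · simp [sumFor, h]; ring
    · simp [sumFor, h, Ne.symm h]

-- Characterisation of Source B's merge pass on a key-descending list:
-- same key set, strictly descending distinct keys, and each entry holds its key's total.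
theorem mergeRuns_spec : ∀ (L : List (Int × Int)),
    L.Pairwise (fun p q => q.1 ≤ p.1) →
    (∀ k, k ∈ (mergeRuns L).map (·.1) ↔ k ∈ L.map (·.1)) ∧
    ((mergeRuns L).Pairwise (fun p q => q.1 < p.1)) ∧
    (∀ p ∈ mergeRuns L, p.2 = sumFor L p.1) := by
  intro L
  induction L using mergeRuns.induct with
  | case1 =>
    intro _; exact ⟨fun k => by simp [mergeRuns], by simp [mergeRuns], by simp [mergeRuns]⟩
  | case2 p =>
    intro _
    refine ⟨fun k => by simp [mergeRuns], by simp [mergeRuns], ?_⟩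
    intro r hr
    simp [mergeRuns] at hr
    subst hr
    simp [sumFor]
  | case3 p q t heq ih =>
    intro h
    have hk : p.1 = q.1 := by simpa using heq
    have h' : ((p.1, p.2 + q.2) :: t).Pairwise (fun p q => q.1 ≤ p.1) := by
      have := h.tail
      refine List.pairwise_cons.mpr ⟨?_, this.tail⟩
      intro r hr
      exact (List.pairwise_cons.mp h).1 r (List.mem_cons_of_mem _ hr)
    obtain ⟨ihm, ihpw, ihv⟩ := ih h'
    have hsum : ∀ k, sumFor ((p.1, p.2 + q.2) :: t) k = sumFor (p :: q :: t) k := by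
      intro k
      by_cases hpk : p.1 = k
      · simp [sumFor, hpk, hk ▸ hpk]; ring
      · simp [sumFor, hpk, hk ▸ hpk]
    have hm : mergeRuns (p :: q :: t) = mergeRuns ((p.1, p.2 + q.2) :: t) := by
      rw [mergeRuns]; simp [heq]
    refine ⟨?_, by rw [hm]; exact ihpw, ?_⟩
    · intro k
      rw [hm, ihm k]
      simp [hk]
    · intro r hr
      rw [hm] at hr
      rw [ihv r hr, hsum]
  | case4 p q t heq ih =>
    intro h
    have hk : p.1 ≠ q.1 := by simpa using heq
    obtain ⟨ihm, ihpw, ihv⟩ := ih h.tail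
    have hqp : q.1 < p.1 :=
      lt_of_le_of_ne ((List.pairwise_cons.mp h).1 q (List.mem_cons_self ..))
        (fun h2 : q.1 = p.1 => hk h2.symm)
    have hlt : ∀ r ∈ q :: t, r.1 < p.1 := by
      intro r hr
      rcases List.mem_cons.mp hr with hrq | hrt
      · rw [hrq]; exact hqp
      · exact lt_of_le_of_lt ((List.pairwise_cons.mp h.tail).1 r hrt) hqp
    have hm : mergeRuns (p :: q :: t) = p :: mergeRuns (q :: t) := by
      rw [mergeRuns]; simp [heq]
    have hkeyrec : ∀ k, k ∈ (mergeRuns (q :: t)).map (·.1) → k < p.1 := by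
      intro k hkm
      rw [ihm k] at hkm
      obtain ⟨r, hr, hrk⟩ := List.mem_map.mp hkm
      exact hrk ▸ hlt r hr
    have hnotin : sumFor (q :: t) p.1 = 0 := by
      have : (q :: t).filter (fun r => r.1 == p.1) = [] := by
        rw [List.filter_eq_nil_iff]
        intro r hr
        simp [Int.ne_of_lt (hlt r hr)]
      simp [sumFor, this]
    refine ⟨?_, ?_, ?_⟩
    · intro k
      rw [hm]
      simp [ihm k]
    · rw [hm]
      refine List.pairwise_cons.mpr ⟨?_, ihpw⟩
      intro r hr
      exact hkeyrec r.1 (List.mem_map.mpr ⟨r, hr, rfl⟩)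
    · intro r hr
      rw [hm] at hr
      rcases List.mem_cons.mp hr with hrp | hrm
      · subst hrp
        have : sumFor (r :: q :: t) r.1 = r.2 + sumFor (q :: t) r.1 := by
          simp [sumFor]
        rw [this, hnotin]; ring
      · have hne : r.1 ≠ p.1 := Int.ne_of_lt (hkeyrec r.1 (List.mem_map.mpr ⟨r, hrm, rfl⟩))
        have : sumFor (p :: q :: t) r.1 = sumFor (q :: t) r.1 := by
          simp [sumFor, Ne.symm hne]
        rw [ihv r hrm, this]

-- filtered value sums are invariant under permutation of the pair list
theorem sumFor_perm {L L' : List (Int × Int)} (h : L.Perm L') (k : Int) :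
    sumFor L k = sumFor L' k :=
  List.Perm.sum_eq ((h.filter _).map _)

-- ===== VERDICT (by name: the statement is the Claim_ definition above) =====
theorem f_spec : Claim_equal_f := by
  intro a b _
  obtain ⟨a1, a2, a3, a4⟩ := a
  obtain ⟨b1, b2, b3, b4⟩ := b
  show f _ _ = f_alt _ _
  set P : List (Int × Int) := [(a1, a2), (a3, a4), (b1, b2), (b3, b4)] with hP
  -- A's counter
  have hcnt :
      ([((a1, a2, a3, a4) : Int × Int × Int × Int), (b1, b2, b3, b4)].foldl (fun d x =>
        let d := PySem.Dict.insert d x.1 (PySem.Dict.getD d x.1 0 + x.2.1)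
        PySem.Dict.insert d x.2.2.1 (PySem.Dict.getD d x.2.2.1 0 + x.2.2.2)) PySem.Dict.empty)
      = P.foldl (fun d p => PySem.Dict.insert d p.1 (PySem.Dict.getD d p.1 0 + p.2)) PySem.Dict.empty := rfl
  set c := P.foldl (fun d p => PySem.Dict.insert d p.1 (PySem.Dict.getD d p.1 0 + p.2)) PySem.Dict.empty with hc
  have hkeys : c.keys = PySem.Set.ofList [a1, a3, b1, b3] := by
    rw [hc, hP, PySem.Dict.keys_foldl_insert_key]; rfl
  have hg : ∀ k, c.getD k 0 = sumFor P k := by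
    intro k; rw [hc, getD_foldl_insert_add]; simp
  -- B's sorted pair list and merge
  set S := PySem.List.sorted P (fun p => p.1) true with hS
  have hSperm : S.Perm P := PySem.List.sorted_perm P (fun p => p.1) true
  obtain ⟨hmem, hpw, hval⟩ := mergeRuns_spec S (PySem.List.sorted_pairwise_rev P (fun p => p.1))
  set M := mergeRuns S with hM
  -- the merged key column is exactly sorted(c.keys, reverse=True)
  have hndM : (M.map (·.1)).Nodup := by
    rw [List.nodup_iff_pairwise_ne]
    exact (List.pairwise_map.mpr (hpw.imp fun h => ne_of_gt h))
  have hmemM : ∀ k, k ∈ M.map (·.1) ↔ k ∈ PySem.Set.ofList [a1, a3, b1, b3] := by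
    intro k
    rw [hmem k, PySem.Set.mem_ofList]
    constructor
    · intro hkS
      have : k ∈ P.map (·.1) := (hSperm.map _).mem_iff.mp hkS
      simpa [hP] using this
    · intro hk
      apply (hSperm.map (·.1)).mem_iff.mpr
      simpa [hP] using hk
  have hpermK : (M.map (·.1)).Perm (PySem.Set.ofList [a1, a3, b1, b3]) :=
    (List.perm_ext_iff_of_nodup hndM (PySem.Set.nodup_ofList _)).mpr hmemM
  have hsorted : PySem.List.sorted (PySem.Set.ofList [a1, a3, b1, b3]) (fun k => k) true
      = M.map (·.1) :=
    PySem.List.sorted_rev_eq_of_perm_of_pairwise_gt _ _ _ hpermK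
      (List.pairwise_map.mpr hpw)
  -- each merged entry is (its key, that key's total over P)
  have hMmap : (M.map (·.1)).map (fun k => (k, sumFor P k)) = M := by
    rw [List.map_map]
    have : ∀ r ∈ M, ((fun k => (k, sumFor P k)) ∘ (·.1)) r = r := by
      intro r hr
      have : r.2 = sumFor P r.1 := by rw [hval r hr, sumFor_perm hSperm]
      simp [Function.comp, this.symm]
    exact (List.map_congr_left this).trans (List.map_id' _)
  -- evaluate both sides over the merged key column
  have hfa : f (a1, a2, a3, a4) (b1, b2, b3, b4)
      = (match M.map (·.1) with
          | [] => ((0 : Int), (0 : Int), (0 : Int), (0 : Int))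
          | [k0] => (k0, sumFor P k0, 0, 0)
          | k0 :: k1 :: _ => (k0, sumFor P k0, k1, sumFor P k1)) := by
    show (match PySem.List.sorted c.keys (fun k => k) true with
          | [] => ((0 : Int), (0 : Int), (0 : Int), (0 : Int))
          | [k0] => (k0, c.getD k0 0, 0, 0)
          | k0 :: k1 :: _ => (k0, c.getD k0 0, k1, c.getD k1 0)) = _
    rw [hkeys, hsorted]
    cases M.map (·.1) with
    | nil => rfl
    | cons k0 ks => cases ks with
      | nil => simp only [hg]
      | cons k1 ks2 => simp only [hg]
  have hfb : f_alt (a1, a2, a3, a4) (b1, b2, b3, b4)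
      = (match M.map (·.1) with
          | [] => ((0 : Int), (0 : Int), (0 : Int), (0 : Int))
          | [k0] => (k0, sumFor P k0, 0, 0)
          | k0 :: k1 :: _ => (k0, sumFor P k0, k1, sumFor P k1)) := by
    show (let m := mergeRuns (PySem.List.sorted P (fun p => p.1) true) ++ [(0, 0), (0, 0)]
          let g0 := PySem.List.pyGetD m 0 ((0 : Int), (0 : Int))
          let g1 := PySem.List.pyGetD m 1 ((0 : Int), (0 : Int))
          (g0.1, g0.2, g1.1, g1.2)) = _
    have hrw : mergeRuns (PySem.List.sorted P (fun p => p.1) true)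
        = (M.map (·.1)).map (fun k => (k, sumFor P k)) := by
      rw [← hS, ← hM]; exact hMmap.symm
    rw [hrw]
    generalize M.map (·.1) = ks
    cases ks with
    | nil => rfl
    | cons k0 ks => cases ks with
      | nil => rfl
      | cons k1 ks2 => simp [PySem.List.pyGetD_ofNat']
  rw [hfa, hfb]
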